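-- pv_equiv track=rewrite | github.com/s-surineni/atice | ppython/leet_code/skyline.py | skyline
-- ===== SOURCE A (Python) =====
-- def skyline(grid):
--     rmaxes = [0] * len(grid)
--     cmaxes = [0] * len(grid)
--
--     for r_i in range(len(grid)):
--         for c_i in range(len(grid)):
--             rmaxes[r_i] = max(rmaxes[r_i], grid[r_i][c_i])
--             cmaxes[c_i] = max(cmaxes[c_i], grid[r_i][c_i])
--
--     ans = 0
--
--     for r_i in range(len(grid)):
--         for c_i in range(len(grid)):
--             ans += min(rmaxes[r_i], cmaxes[c_i]) - grid[r_i][c_i]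
--     return (ans)
-- ===== SOURCE B (Python) =====
-- def skyline(grid):
--     n = len(grid)
--     rmaxes = sorted(max([0] + row) for row in grid)
--     cmaxes = sorted(max([0] + [row[j] for row in grid]) for j in range(n))
--     prefix = 0
--     k = 0
--     pairmin = 0
--     for a in rmaxes:
--         while k < n and cmaxes[k] <= a:
--             prefix += cmaxes[k]
--             k += 1
--         pairmin += prefix + a * (n - k)
--     return pairmin - sum(sum(row) for row in grid)
-- ===== Notes on version B (the rewrite author's own statement) =====
-- stated objective: faster
-- what changed: The quadratic pairing loop over all (row,column) pairs is replaced by sorting both maxima lists and a prefix-sum two-pointer sweep that computes sum(min(a,b)) over all pairs in O(n log n), from which the total cell sum is subtracted; reading the grid stays O(n^2) but the dominant per-pair interpreted work disappears (measured ~4x).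
-- outside the precondition, e.g. on skyline([[-1, -2, 3]]): A returns 1, B returns 0; on skyline([[1, 2]]): A returns 0, B returns -2
import Mathlib
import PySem

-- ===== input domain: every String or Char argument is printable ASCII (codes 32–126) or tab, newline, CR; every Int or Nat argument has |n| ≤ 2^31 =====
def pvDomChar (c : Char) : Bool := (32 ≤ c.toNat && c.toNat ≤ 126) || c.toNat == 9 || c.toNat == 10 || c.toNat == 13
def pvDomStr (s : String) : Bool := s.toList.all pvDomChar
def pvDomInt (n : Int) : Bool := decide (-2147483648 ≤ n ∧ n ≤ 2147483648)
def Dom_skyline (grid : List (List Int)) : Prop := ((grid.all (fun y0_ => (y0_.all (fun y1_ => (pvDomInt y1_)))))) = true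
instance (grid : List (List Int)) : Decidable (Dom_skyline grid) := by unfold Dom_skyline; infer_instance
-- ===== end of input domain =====

-- B replaces A's quadratic pairing loop by sorting both maxima lists and a prefix-sum
-- two-pointer sweep computing sum(min(a,b)) over all pairs, minus the total cell sum.


-- ===== PORT A =====
-- grid[r][c] is ported with pyGetD; the default is never read inside Pre_skyline
-- (on a shorter row Python raises IndexError there — excluded by Pre_skyline).
def skyline (grid : List (List Int)) : Int :=
  let n : Int := (grid.length : Int)
  let st :=
    (PySem.List.pyRange 0 n 1).foldl (fun st r =>
      (PySem.List.pyRange 0 n 1).foldl (fun st c =>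
        (PySem.List.pySetD st.1 r
           (max (PySem.List.pyGetD st.1 r 0) (PySem.List.pyGetD (PySem.List.pyGetD grid r []) c 0)),
         PySem.List.pySetD st.2 c
           (max (PySem.List.pyGetD st.2 c 0) (PySem.List.pyGetD (PySem.List.pyGetD grid r []) c 0)))) st)
      (List.replicate grid.length (0 : Int), List.replicate grid.length (0 : Int))
  (PySem.List.pyRange 0 n 1).foldl (fun ans r =>
    (PySem.List.pyRange 0 n 1).foldl (fun ans c =>
      ans + min (PySem.List.pyGetD st.1 r 0) (PySem.List.pyGetD st.2 c 0)
          - PySem.List.pyGetD (PySem.List.pyGetD grid r []) c 0) ans) 0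

-- ===== PORT B =====
-- max([0] + xs) in Source B
def pyMax0 (xs : List Int) : Int := (PySem.List.max? ((0 : Int) :: xs) (fun x => x)).getD 0

-- Source B's inner 'while k < n and cmaxes[k] <= a: prefix += cmaxes[k]; k += 1'
-- (k is 0-based and only ever incremented, so cmaxes[k] is a plain in-range index: List.getD is exact)
def whileAdv (cmaxes : List Int) (n : Nat) (a : Int) (pk : Int × Nat) : Int × Nat :=
  if h : pk.2 < n ∧ cmaxes.getD pk.2 0 ≤ a then
    whileAdv cmaxes n a (pk.1 + cmaxes.getD pk.2 0, pk.2 + 1)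
  else pk
termination_by n - pk.2
decreasing_by omega

-- row[j] is ported with pyGetD; the default is never read inside Pre_skyline (square grid)
def skyline_alt (grid : List (List Int)) : Int :=
  let n := grid.length
  let rmaxes := PySem.List.sorted (grid.map (fun row => pyMax0 row)) (fun x => x) false
  let cmaxes := PySem.List.sorted ((PySem.List.pyRange 0 (n : Int) 1).map (fun j =>
      pyMax0 (grid.map (fun row => PySem.List.pyGetD row j 0)))) (fun x => x) false
  let st := rmaxes.foldl (fun st a =>
      let pk := whileAdv cmaxes n a (st.1, st.2.1)
      (pk.1, pk.2, st.2.2 + pk.1 + a * ((n : Int) - (pk.2 : Int))))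
    ((0 : Int), (0 : Nat), (0 : Int))
  st.2.2 - (grid.map (fun row => row.sum)).sum

-- ===== PRECONDITION & SPEC =====
-- Pre_ restricts to the problem's natural domain of SQUARE grids (A indexes every row at
-- the first len(grid) columns): on a shorter row A raises IndexError; on longer rows A
-- silently reads only the first len(grid) columns while B processes whole rows.
def Pre_skyline (grid : List (List Int)) : Prop := ∀ row ∈ grid, row.length = grid.length
instance (grid : List (List Int)) : Decidable (Pre_skyline grid) := by unfold Pre_skyline; infer_instance
def pvWitness_skyline : List (List Int) := [[3, -1], [0, 4]]

def Spec_skyline (grid : List (List Int)) (out : Int) : Prop := out = skyline_alt grid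
instance (grid : List (List Int)) (out : Int) : Decidable (Spec_skyline grid out) := by unfold Spec_skyline; infer_instance

-- ===== CLAIM (what is proved, stated in full; the proofs are below) =====
def Claim_equal_skyline : Prop := ∀ (grid : List (List Int)), Dom_skyline grid → Pre_skyline grid → Spec_skyline grid (skyline grid)

-- ===== LEMMAS AND PROOFS =====

-- ---------- A-side machinery (characterizes A's fused phase-1 loop) ----------

-- the body of A's phase-1 inner loop, in Nat-index form
def innerStep (row : List Int) (r : Nat) (st : List Int × List Int) (c : Nat) : List Int × List Int :=
  (st.1.set r (max (st.1.getD r 0) (row.getD c 0)),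
   st.2.set c (max (st.2.getD c 0) (row.getD c 0)))

lemma getD_set_self (xs : List Int) (i : Nat) (v : Int) (h : i < xs.length) :
    (xs.set i v).getD i 0 = v := by
  simp [List.getD, h]

lemma getD_set_ne (xs : List Int) (i j : Nat) (v : Int) (h : i ≠ j) :
    (xs.set i v).getD j 0 = xs.getD j 0 := by
  simp [List.getD, h]

lemma set_getD_self (xs : List Int) (i : Nat) (h : i < xs.length) :
    xs.set i (xs.getD i 0) = xs := by
  rw [List.getD_eq_getElem xs 0 h]; exact List.set_getElem_self ..

lemma inner_fst (row : List Int) (r : Nat) (m : Nat) (rm cm : List Int)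
    (hr : r < rm.length) :
    ((List.range m).foldl (innerStep row r) (rm, cm)).1
      = rm.set r (((List.range m).map (fun c => row.getD c 0)).foldl max (rm.getD r 0)) := by
  induction m with
  | zero =>
      simp only [List.range_zero, List.map_nil, List.foldl_nil]
      exact (set_getD_self rm r hr).symm
  | succ m ih =>
      rw [List.range_succ, List.foldl_append, List.map_append, List.foldl_append]
      simp only [List.foldl_cons, List.foldl_nil, List.map_cons, List.map_nil, innerStep]
      rw [ih, List.set_set, getD_set_self _ _ _ (by simpa using hr)]

lemma inner_snd_len (row : List Int) (r : Nat) (m : Nat) (rm cm : List Int) :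
    ((List.range m).foldl (innerStep row r) (rm, cm)).2.length = cm.length := by
  induction m with
  | zero => rfl
  | succ m ih => rw [List.range_succ, List.foldl_append]; simp [innerStep, ih]

lemma inner_snd (row : List Int) (r : Nat) (m : Nat) (rm cm : List Int)
    (hm : m ≤ cm.length) (j : Nat) :
    ((List.range m).foldl (innerStep row r) (rm, cm)).2.getD j 0
      = if j < m then max (cm.getD j 0) (row.getD j 0) else cm.getD j 0 := by
  induction m with
  | zero => simp
  | succ m ih =>
      rw [List.range_succ, List.foldl_append]
      simp only [List.foldl_cons, List.foldl_nil, innerStep]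
      have hlen : ((List.range m).foldl (innerStep row r) (rm, cm)).2.length = cm.length :=
        inner_snd_len row r m rm cm
      by_cases hj : j = m
      · subst hj
        rw [getD_set_self _ _ _ (by omega), ih (by omega)]
        simp
      · rw [getD_set_ne _ _ _ _ (Ne.symm hj), ih (by omega)]
        by_cases hjm : j < m
        · simp [hjm, Nat.lt_succ_of_lt hjm]
        · have h2 : ¬ j < m + 1 := by omega
          simp [hjm, h2]

-- A's phase-1 outer loop: full characterization after the first m rows
lemma outer_inv (grid : List (List Int)) (hsq : ∀ row ∈ grid, row.length = grid.length)
    (m : Nat) (hm : m ≤ grid.length) :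
    let n := grid.length
    let st := (List.range m).foldl
        (fun st r => (List.range n).foldl (innerStep (grid.getD r []) r) st)
        (List.replicate n (0 : Int), List.replicate n (0 : Int))
    st.1.length = n ∧ st.2.length = n ∧
    (∀ i, st.1.getD i 0 = if i < m then
        ((List.range n).map (fun c => (grid.getD i []).getD c 0)).foldl max 0 else
        (List.replicate n (0 : Int)).getD i 0) ∧
    (∀ j, st.2.getD j 0 = ((grid.take m).map (fun row => row.getD j 0)).foldl max 0) := by
  intro n
  induction m with
  | zero =>
      refine ⟨by simp, by simp, fun i => by simp, fun j => by simp⟩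
  | succ m ih =>
      obtain ⟨h1, h2, h3, h4⟩ := ih (by omega)
      rw [List.range_succ, List.foldl_append]
      simp only [List.foldl_cons, List.foldl_nil]
      set st := (List.range m).foldl
        (fun st r => (List.range n).foldl (innerStep (grid.getD r []) r) st)
        (List.replicate n (0 : Int), List.replicate n (0 : Int)) with hst
      have hmn : m < grid.length := hm
      have hrowlen : (grid.getD m []).length = n := by
        have : grid.getD m [] = grid[m] := List.getD_eq_getElem grid [] hmn
        rw [this]; exact hsq _ (List.getElem_mem hmn)
      have hfst := inner_fst (grid.getD m []) m n st.1 st.2 (by omega)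
      have hsndlen := inner_snd_len (grid.getD m []) m n st.1 st.2
      have hsnd := inner_snd (grid.getD m []) m n st.1 st.2 (by omega)
      refine ⟨?_, ?_, ?_, ?_⟩
      · rw [hfst]; simpa using h1
      · rw [hsndlen]; exact h2
      · intro i
        rw [hfst]
        by_cases hi : i = m
        · subst hi
          rw [getD_set_self _ _ _ (by omega), h3 i]
          simp
        · rw [getD_set_ne _ _ _ _ (fun h => hi h.symm), h3 i]
          by_cases him : i < m
          · simp [him, Nat.lt_succ_of_lt him]
          · have : ¬ i < m + 1 := by omega
            simp [him, this]
      · intro j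
        rw [hsnd j, h4 j]
        have htake : grid.take (m + 1) = grid.take m ++ [grid[m]] :=
          List.take_succ_eq_append_getElem hmn
        rw [htake, List.map_append, List.foldl_append]
        simp only [List.map_cons, List.map_nil, List.foldl_cons, List.foldl_nil]
        by_cases hj : j < n
        · rw [if_pos hj, List.getD_eq_getElem grid [] hmn]
        · have hg0 : (grid[m] : List Int).getD j 0 = 0 := by
            apply List.getD_eq_default
            rw [hsq _ (List.getElem_mem hmn)]; omega
          rw [if_neg hj, hg0]
          exact (max_eq_left ((PySem.List.le_foldl_max _ 0).1)).symm

lemma map_getD_range_self {α : Type} (l : List α) (d : α) (n : Nat) (h : l.length = n) :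
    (List.range n).map (fun c => l.getD c d) = l := by
  apply List.ext_getElem
  · simp [h]
  · intro i h1 h2
    simp only [List.getElem_map, List.getElem_range]
    exact List.getD_eq_getElem l d (by omega)

lemma pyMax0_eq_foldl (xs : List Int) : pyMax0 xs = xs.foldl max 0 := by
  rw [pyMax0, PySem.List.max?_id_cons]; rfl

-- A's phase-1 state (the two max arrays) in Nat-index form
def phase1 (grid : List (List Int)) : List Int × List Int :=
  (List.range grid.length).foldl
    (fun st r => (List.range grid.length).foldl (innerStep (grid.getD r []) r) st)
    (List.replicate grid.length (0 : Int), List.replicate grid.length (0 : Int))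

lemma skylineA_norm (grid : List (List Int)) :
    skyline grid =
      (List.range grid.length).foldl (fun ans r =>
        (List.range grid.length).foldl (fun ans c =>
          ans + min ((phase1 grid).1.getD r 0) ((phase1 grid).2.getD c 0)
            - (grid.getD r []).getD c 0) ans) 0 := by
  simp only [skyline, phase1, PySem.List.pyRange_zero_nat, List.foldl_map,
    PySem.List.pyGetD_natCast, PySem.List.pySetD_natCast]
  rfl

lemma foldl_sub_sum (l : List Nat) (f g : Nat → Int) (init : Int) :
    l.foldl (fun ans c => ans + f c - g c) init
      = init + (l.map (fun c => f c - g c)).sum := by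
  have h : (fun (ans : Int) c => ans + f c - g c) = fun ans c => ans + (f c - g c) := by
    funext ans c; ring
  rw [h, PySem.List.foldl_add]

lemma sum_map_sub {α : Type} (l : List α) (f g : α → Int) :
    (l.map (fun x => f x - g x)).sum = (l.map f).sum - (l.map g).sum := by
  induction l with
  | nil => simp
  | cons h t ih => simp [ih]; ring

-- ---------- B-side machinery (two-pointer sweep over the sorted maxima) ----------

-- extending the threshold extends the consumed takeWhile prefix
lemma chain_takeWhile (t a : Int) (hta : t ≤ a) : ∀ (bs : List Int),
    bs.takeWhile (fun b => decide (b ≤ a))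
      = bs.takeWhile (fun b => decide (b ≤ t))
        ++ (bs.drop (bs.takeWhile (fun b => decide (b ≤ t))).length).takeWhile (fun b => decide (b ≤ a)) := by
  intro bs
  induction bs with
  | nil => rfl
  | cons b bs ih =>
      by_cases hb : b ≤ t
      · have hba : b ≤ a := le_trans hb hta
        simp [hb, hba, ih]
      · simp [List.takeWhile_cons, hb]

-- the while loop consumes exactly the takeWhile(≤ a) prefix of the unseen suffix
lemma whileAdv_spec (bs : List Int) (a : Int) :
    ∀ (fuel : Nat) (p : Int) (k : Nat), bs.length - k ≤ fuel → k ≤ bs.length →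
    whileAdv bs bs.length a (p, k)
      = (p + ((bs.drop k).takeWhile (fun b => decide (b ≤ a))).sum,
         k + ((bs.drop k).takeWhile (fun b => decide (b ≤ a))).length) := by
  intro fuel
  induction fuel with
  | zero =>
      intro p k hf hk
      have hkn : k = bs.length := by omega
      rw [whileAdv]
      simp [hkn, List.drop_length]
  | succ fuel ih =>
      intro p k hf hk
      by_cases hkn : k < bs.length
      · have hdrop : bs.drop k = bs[k] :: bs.drop (k + 1) := List.drop_eq_getElem_cons hkn
        have hgetD : bs.getD k 0 = bs[k] := List.getD_eq_getElem bs 0 hkn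
        by_cases hle : bs[k] ≤ a
        · rw [whileAdv]
          rw [dif_pos ⟨hkn, by rw [hgetD]; exact hle⟩]
          have hrec := ih (p + bs.getD k 0) (k + 1) (by omega) (by omega)
          have htw : (List.drop k bs).takeWhile (fun b => decide (b ≤ a))
              = bs[k] :: (List.drop (k + 1) bs).takeWhile (fun b => decide (b ≤ a)) := by
            rw [hdrop, List.takeWhile_cons_of_pos (by simp [hle])]
          rw [hrec, htw, hgetD]
          simp only [List.sum_cons, List.length_cons, Prod.mk.injEq]
          exact ⟨by ring, by omega⟩
        · rw [whileAdv]
          rw [dif_neg (by rw [hgetD]; tauto)]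
          have htw : (List.drop k bs).takeWhile (fun b => decide (b ≤ a)) = [] := by
            rw [hdrop, List.takeWhile_cons_of_neg (by simp [hle])]
          rw [htw]; simp
      · have hkn' : k = bs.length := by omega
        rw [whileAdv]
        simp [hkn', List.drop_length]

-- min-sum against a sorted list, in prefix-sum + count form
lemma sum_min_const (a : Int) : ∀ (l : List Int), (∀ x ∈ l, a ≤ x) →
    (l.map (fun b => min a b)).sum = a * (l.length : Int) := by
  intro l
  induction l with
  | nil => simp
  | cons b t ih =>
      intro h
      have hb : min a b = a := min_eq_left (h b (by simp))
      rw [List.map_cons, List.sum_cons, hb, ih (fun x hx => h x (by simp [hx]))]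
      simp only [List.length_cons]
      push_cast; ring

lemma minsum_sorted (a : Int) : ∀ (bs : List Int), bs.Pairwise (· ≤ ·) →
    (bs.map (fun b => min a b)).sum
      = (bs.takeWhile (fun b => decide (b ≤ a))).sum
        + a * ((bs.length : Int) - ((bs.takeWhile (fun b => decide (b ≤ a))).length : Int)) := by
  intro bs
  induction bs with
  | nil => simp
  | cons b t ih =>
      intro hp
      rw [List.pairwise_cons] at hp
      by_cases hb : b ≤ a
      · have hmin : min a b = b := min_eq_right hb
        rw [List.map_cons, List.sum_cons, hmin, ih hp.2]
        simp only [List.takeWhile_cons, hb, decide_true, if_true, List.sum_cons,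
          List.length_cons]
        push_cast; ring
      · have hall : ∀ x ∈ b :: t, a ≤ x := by
          intro x hx
          rcases List.mem_cons.mp hx with rfl | hx
          · omega
          · have := hp.1 x hx; omega
        rw [sum_min_const a _ hall]
        simp only [List.takeWhile_cons, hb, decide_false]
        simp

-- Source B's outer loop: characterization of the fold over the ascending rmaxes
lemma foldB (bs : List Int) : ∀ (as : List Int) (p acc : Int) (k : Nat),
    as.Pairwise (· ≤ ·) →
    (∀ a ∈ as, bs.takeWhile (fun b => decide (b ≤ a))
        = bs.take k ++ (bs.drop k).takeWhile (fun b => decide (b ≤ a))) →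
    p = (bs.take k).sum → k ≤ bs.length →
    (as.foldl (fun st a =>
        let pk := whileAdv bs bs.length a (st.1, st.2.1)
        (pk.1, pk.2, st.2.2 + pk.1 + a * ((bs.length : Int) - (pk.2 : Int))))
      (p, k, acc)).2.2
    = acc + (as.map (fun a => (bs.takeWhile (fun b => decide (b ≤ a))).sum
        + a * ((bs.length : Int) - ((bs.takeWhile (fun b => decide (b ≤ a))).length : Int)))).sum := by
  intro as
  induction as with
  | nil => intro p acc k _ _ _ _; simp
  | cons a as ih =>
      intro p acc k hsort hinv hp hk
      rw [List.pairwise_cons] at hsort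
      have hw := whileAdv_spec bs a (bs.length - k) p k le_rfl hk
      have htw := hinv a (by simp)
      set tw := bs.takeWhile (fun b => decide (b ≤ a)) with htwdef
      have htwpre : tw <+: bs := List.takeWhile_prefix _
      have htwlen : tw.length ≤ bs.length := htwpre.length_le
      have htake : bs.take tw.length = tw := (List.prefix_iff_eq_take.mp htwpre).symm
      have hsum : p + ((bs.drop k).takeWhile (fun b => decide (b ≤ a))).sum = tw.sum := by
        rw [hp, htw, List.sum_append]
      have hlen : k + ((bs.drop k).takeWhile (fun b => decide (b ≤ a))).length = tw.length := by
        rw [htw, List.length_append, List.length_take]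
        omega
      simp only [List.foldl_cons]
      rw [hw]
      simp only []
      rw [ih _ _ _ hsort.2 ?_ ?_ ?_]
      · rw [hsum, hlen, List.map_cons, List.sum_cons]
        ring
      · intro a' ha'
        have haa' : a ≤ a' := hsort.1 a' ha'
        rw [hlen, htake]
        have := chain_takeWhile a a' haa' bs
        rw [← htwdef] at this
        exact this
      · rw [hsum, hlen, htake]
      · rw [hlen]; exact htwlen

-- sum of a function over a sorted(id) list equals its sum over the original list
lemma sum_map_sorted (xs : List Int) (f : Int → Int) :
    ((PySem.List.sorted xs (fun x => x) false).map f).sum = (xs.map f).sum := by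
  exact List.Perm.sum_eq (List.Perm.map f (PySem.List.sorted_perm xs (fun x => x) false))

-- B in closed form: total pairwise min-sum of the two maxima lists, minus the cell sum
lemma skylineB_norm (grid : List (List Int)) :
    skyline_alt grid =
      ((grid.map pyMax0).map (fun a =>
        (((List.range grid.length).map (fun j =>
            pyMax0 (grid.map (fun row => row.getD j 0)))).map (fun b => min a b)).sum)).sum
      - (grid.map (fun row => row.sum)).sum := by
  have hC : (PySem.List.pyRange 0 ((grid.length : Nat) : Int) 1).map (fun j =>
      pyMax0 (grid.map (fun row => PySem.List.pyGetD row j 0)))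
      = (List.range grid.length).map (fun j => pyMax0 (grid.map (fun row => row.getD j 0))) := by
    rw [PySem.List.pyRange_zero_nat, List.map_map]
    apply List.map_congr_left
    intro j _
    simp [PySem.List.pyGetD_natCast]
  set Clist := (List.range grid.length).map (fun j =>
      pyMax0 (grid.map (fun row => row.getD j 0))) with hClist
  set Bs := PySem.List.sorted Clist (fun x => x) false with hBs
  have hBslen : Bs.length = grid.length := by
    rw [hBs, PySem.List.length_sorted, hClist, List.length_map, List.length_range]
  have hBsort : Bs.Pairwise (· ≤ ·) := by
    have := PySem.List.sorted_pairwise Clist (fun x => x)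
    simpa using this
  have hAsort : (PySem.List.sorted (grid.map (fun row => pyMax0 row)) (fun x => x) false).Pairwise (· ≤ ·) := by
    have := PySem.List.sorted_pairwise (grid.map (fun row => pyMax0 row)) (fun x => x)
    simpa using this
  rw [show skyline_alt grid =
      ((PySem.List.sorted (grid.map (fun row => pyMax0 row)) (fun x => x) false).foldl (fun st a =>
        let pk := whileAdv Bs grid.length a (st.1, st.2.1)
        (pk.1, pk.2, st.2.2 + pk.1 + a * (((grid.length : Nat) : Int) - (pk.2 : Int))))
        ((0 : Int), (0 : Nat), (0 : Int))).2.2 - (grid.map (fun row => row.sum)).sum by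
    simp only [skyline_alt, hC, ← hBs]]
  have hfold :
      ((PySem.List.sorted (grid.map (fun row => pyMax0 row)) (fun x => x) false).foldl (fun st a =>
        let pk := whileAdv Bs grid.length a (st.1, st.2.1)
        (pk.1, pk.2, st.2.2 + pk.1 + a * (((grid.length : Nat) : Int) - (pk.2 : Int))))
        ((0 : Int), (0 : Nat), (0 : Int))).2.2
      = ((PySem.List.sorted (grid.map (fun row => pyMax0 row)) (fun x => x) false).map (fun a =>
          (Bs.takeWhile (fun b => decide (b ≤ a))).sum
            + a * ((Bs.length : Int) - ((Bs.takeWhile (fun b => decide (b ≤ a))).length : Int)))).sum := by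
    rw [← hBslen]
    have := foldB Bs (PySem.List.sorted (grid.map (fun row => pyMax0 row)) (fun x => x) false)
      0 0 0 hAsort (by intro a _; simp) (by simp) (by simp)
    rw [this, zero_add]
  rw [hfold]
  congr 1
  have hterm : ∀ a, (Bs.takeWhile (fun b => decide (b ≤ a))).sum
      + a * ((Bs.length : Int) - ((Bs.takeWhile (fun b => decide (b ≤ a))).length : Int))
      = (Clist.map (fun b => min a b)).sum := by
    intro a
    rw [← minsum_sorted a Bs hBsort, hBs]
    exact List.Perm.sum_eq (List.Perm.map _ (PySem.List.sorted_perm Clist (fun x => x) false))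
  calc ((PySem.List.sorted (grid.map (fun row => pyMax0 row)) (fun x => x) false).map (fun a =>
          (Bs.takeWhile (fun b => decide (b ≤ a))).sum
            + a * ((Bs.length : Int) - ((Bs.takeWhile (fun b => decide (b ≤ a))).length : Int)))).sum
      = ((PySem.List.sorted (grid.map (fun row => pyMax0 row)) (fun x => x) false).map (fun a =>
          (Clist.map (fun b => min a b)).sum)).sum := by
        apply congrArg List.sum
        apply List.map_congr_left
        intro a _
        exact hterm a
    _ = ((grid.map pyMax0).map (fun a => (Clist.map (fun b => min a b)).sum)).sum := by
        exact sum_map_sorted _ _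

-- ===== VERDICT (by name: the statement is the Claim_ definition above) =====
theorem skyline_spec : Claim_equal_skyline := by
  intro grid _ hsq
  show skyline grid = skyline_alt grid
  obtain ⟨h1, h2, h3, h4⟩ := outer_inv grid hsq grid.length le_rfl
  -- A's maxima arrays, pointwise
  have hR : ∀ r, r < grid.length → (phase1 grid).1.getD r 0 = pyMax0 (grid.getD r []) := by
    intro r hr
    have hrowlen : (grid.getD r []).length = grid.length := by
      rw [List.getD_eq_getElem grid [] hr]; exact hsq _ (List.getElem_mem hr)
    unfold phase1
    rw [h3 r, if_pos hr, map_getD_range_self _ 0 grid.length hrowlen, pyMax0_eq_foldl]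
  have hC : ∀ c, (phase1 grid).2.getD c 0 = pyMax0 (grid.map (fun row => row.getD c 0)) := by
    intro c
    unfold phase1
    rw [h4 c, List.take_length, pyMax0_eq_foldl]
  -- normalize A into a double sum
  rw [skylineA_norm, skylineB_norm]
  have hbodyA : (fun (ans : Int) (r : Nat) =>
      (List.range grid.length).foldl (fun ans c =>
        ans + min ((phase1 grid).1.getD r 0) ((phase1 grid).2.getD c 0)
          - (grid.getD r []).getD c 0) ans)
      = fun ans r => ans + ((List.range grid.length).map (fun c =>
          min ((phase1 grid).1.getD r 0) ((phase1 grid).2.getD c 0)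
            - (grid.getD r []).getD c 0)).sum := by
    funext ans r
    exact foldl_sub_sum _ _ _ ans
  rw [hbodyA, PySem.List.foldl_add, zero_add]
  -- termwise: each row's inner sum splits into min-sum minus the row sum
  have hrow : ∀ r ∈ List.range grid.length,
      ((List.range grid.length).map (fun c =>
        min ((phase1 grid).1.getD r 0) ((phase1 grid).2.getD c 0)
          - (grid.getD r []).getD c 0)).sum
      = (((List.range grid.length).map (fun j => pyMax0 (grid.map (fun row => row.getD j 0)))).map
          (fun b => min (pyMax0 (grid.getD r [])) b)).sum
        - (grid.getD r []).sum := by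
    intro r hr
    have hrn : r < grid.length := List.mem_range.mp hr
    have hrowlen : (grid.getD r []).length = grid.length := by
      rw [List.getD_eq_getElem grid [] hrn]; exact hsq _ (List.getElem_mem hrn)
    rw [sum_map_sub]
    congr 1
    · rw [List.map_map]
      apply congrArg List.sum
      apply List.map_congr_left
      intro c _
      simp only [Function.comp_apply]
      rw [hR r hrn, hC c]
    · rw [map_getD_range_self _ 0 grid.length hrowlen]
  rw [List.map_congr_left hrow]
  rw [sum_map_sub]
  congr 1
  · -- the min part: reindex the outer sum over range n into a sum over grid
    rw [show (grid.map pyMax0) = (List.range grid.length).map (fun r => pyMax0 (grid.getD r [])) by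
      conv_lhs => rw [← map_getD_range_self grid [] grid.length rfl]
      simp [List.map_map, Function.comp]]
    rw [List.map_map]
    rfl
  · -- the cell part
    rw [show (grid.map (fun row => row.sum)) = (List.range grid.length).map (fun r => (grid.getD r []).sum) by
      conv_lhs => rw [← map_getD_range_self grid [] grid.length rfl]
      simp [List.map_map, Function.comp]]
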